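-- pv_equiv track=rewrite | github.com/clapans/Algorism_Study | dong-wan/a.py | solution
-- ===== SOURCE A (Python) =====
-- def solution(numbers, hand):
--     answer = ''
--     if numbers[0] in [2,5,8,0]:
--         if hand == 'left':
--             answer += 'L'
--         else :
--             answer += 'R'
--         for num in numbers[1:len(numbers)]:
--             if num in [1,4,7]:
--                 answer+= 'L'
--             elif num in [3,6,9]:
--                 answer += 'R'
--             else :
--                 if answer[-1] == 'L' :
--                     answer += 'L'
--                 else :
--                     answer += 'R'
--     else :
--         for num in numbers:
--             if num in [1,4,7]:
--                 answer+= 'L'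
--             elif num in [3,6,9]:
--                 answer += 'R'
--             else :
--                 if answer[-1] == 'L' :
--                     answer += 'L'
--                 else :
--                     answer += 'R'
--     return answer
-- ===== SOURCE B (Python) =====
-- def solution(numbers, hand):
--     forced = {1: 'L', 4: 'L', 7: 'L', 3: 'R', 6: 'R', 9: 'R'}
--     chunks = []
--     cur = 'L' if hand == 'left' else 'R'
--     run = 0
--     for n in numbers:
--         if n in forced:
--             chunks.append(cur * run)
--             cur = forced[n]
--             chunks.append(cur)
--             run = 0
--         else:
--             run += 1
--     chunks.append(cur * run)
--     return ''.join(chunks)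
-- ===== Notes on version B (the rewrite author's own statement) =====
-- stated objective: alternative
-- what changed: B is a run-length algorithm with a dict of forced digits: middle-column digits only increment a pending-run counter, and whole chunks (cur * run, then the forced hand) are emitted at each forced digit and joined at the end, instead of A's per-digit append that re-reads answer[-1] and special-cases numbers[0].
import Mathlib
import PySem

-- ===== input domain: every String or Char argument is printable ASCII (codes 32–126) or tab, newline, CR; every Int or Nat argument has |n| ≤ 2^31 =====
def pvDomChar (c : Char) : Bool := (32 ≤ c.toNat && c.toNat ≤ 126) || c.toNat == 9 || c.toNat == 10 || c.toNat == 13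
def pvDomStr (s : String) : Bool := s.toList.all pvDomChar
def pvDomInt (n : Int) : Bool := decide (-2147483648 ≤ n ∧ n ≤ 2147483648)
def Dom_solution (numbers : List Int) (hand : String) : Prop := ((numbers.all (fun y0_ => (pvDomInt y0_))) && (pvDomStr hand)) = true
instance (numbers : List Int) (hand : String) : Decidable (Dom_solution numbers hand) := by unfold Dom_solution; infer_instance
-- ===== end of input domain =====

-- B replaces A's per-digit append-to-answer scan with a run-length algorithm: middle-column
-- digits only bump a pending-run counter, and whole chunks (cur * run) are emitted at each
-- forced digit, looked up in a dict; objective: simpler/alternative decomposition.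

-- ===== PORT A =====
-- one loop iteration of A's body; state none = an IndexError was raised at answer[-1]
def aStep (answer : Option (List Char)) (num : Int) : Option (List Char) :=
  match answer with
  | none => none
  | some a =>
    if num = 1 ∨ num = 4 ∨ num = 7 then some (a ++ ['L'])
    else if num = 3 ∨ num = 6 ∨ num = 9 then some (a ++ ['R'])
    else
      match PySem.List.pyGet? a (-1) with
      | none => none
      | some c => if c = 'L' then some (a ++ ['L']) else some (a ++ ['R'])

def solution (numbers : List Int) (hand : String) : String :=
  match numbers with
  | [] => ""  -- numbers[0] raises IndexError: outside Pre_solution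
  | n0 :: rest =>
    if n0 = 2 ∨ n0 = 5 ∨ n0 = 8 ∨ n0 = 0 then
      let init : List Char := if hand = "left" then ['L'] else ['R']
      match rest.foldl aStep (some init) with
      | some a => String.ofList a
      | none => ""  -- IndexError: outside Pre_solution
    else
      match (n0 :: rest).foldl aStep (some []) with
      | some a => String.ofList a
      | none => ""  -- IndexError: outside Pre_solution

-- ===== PORT B =====
-- the literal dict from Source B
def forcedDict : PySem.Dict Int Char :=
  PySem.Dict.ofList [(1, 'L'), (4, 'L'), (7, 'L'), (3, 'R'), (6, 'R'), (9, 'R')]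

-- one loop iteration of Source B's for-loop; state = (chunks, cur, run)
def bStep (st : List (List Char) × Char × Int) (n : Int) : List (List Char) × Char × Int :=
  match PySem.Dict.get? forcedDict n with
  | some v => (st.1 ++ [List.replicate st.2.2.toNat st.2.1, [v]], v, 0)
  | none => (st.1, st.2.1, st.2.2 + 1)

-- the last two lines of Source B: append the final pending chunk and ''.join
def bFinish (st : List (List Char) × Char × Int) : List Char :=
  (st.1 ++ [List.replicate st.2.2.toNat st.2.1]).flatten

def solution_alt (numbers : List Int) (hand : String) : String :=
  String.ofList (bFinish (numbers.foldl bStep ([], (if hand = "left" then 'L' else 'R'), 0)))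

-- ===== PRECONDITION & SPEC =====
-- Pre_ excludes exactly the inputs on which A raises IndexError: the empty list
-- (at numbers[0]) and lists whose first element is not a keypad digit 0-9
-- (answer[-1] on the empty answer).
def Pre_solution (numbers : List Int) (hand : String) : Prop :=
  numbers ≠ [] ∧ numbers.headD 0 ∈ ([0,1,2,3,4,5,6,7,8,9] : List Int)
instance (numbers : List Int) (hand : String) : Decidable (Pre_solution numbers hand) := by
  unfold Pre_solution; infer_instance

def pvWitness_solution : List Int × String := ([1, 3, 4, 5, 8, 2, 1, 4, 5, 9, 5], "right")

def Spec_solution (numbers : List Int) (hand : String) (out : String) : Prop := out = solution_alt numbers hand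
instance (numbers : List Int) (hand : String) (out : String) : Decidable (Spec_solution numbers hand out) := by unfold Spec_solution; infer_instance

-- ===== CLAIM (what is proved, stated in full; the proofs are below) =====
def Claim_equal_solution : Prop := ∀ (numbers : List Int) (hand : String), Dom_solution numbers hand → Pre_solution numbers hand → Spec_solution numbers hand (solution numbers hand)

-- ===== LEMMAS AND PROOFS =====

-- the sequence of hands the answer consists of, as a plain recursion (proof-side characterisation)
def hseq (c : Char) : List Int → List Char
  | [] => []
  | n :: l =>
    let c' := if n = 1 ∨ n = 4 ∨ n = 7 then 'L'
              else if n = 3 ∨ n = 6 ∨ n = 9 then 'R' else c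
    c' :: hseq c' l

lemma forced_get (n : Int) : PySem.Dict.get? forcedDict n =
    (if n = 1 ∨ n = 4 ∨ n = 7 then some 'L'
     else if n = 3 ∨ n = 6 ∨ n = 9 then some 'R' else none) := by
  by_cases h1 : n = 1; · subst h1; decide
  by_cases h4 : n = 4; · subst h4; decide
  by_cases h7 : n = 7; · subst h7; decide
  by_cases h3 : n = 3; · subst h3; decide
  by_cases h6 : n = 6; · subst h6; decide
  by_cases h9 : n = 9; · subst h9; decide
  have hit : forcedDict.items = [(1,'L'),(4,'L'),(7,'L'),(3,'R'),(6,'R'),(9,'R')] := by decide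
  simp [PySem.Dict.get?, hit, List.find?, h1, h4, h7, h3, h6, h9,
    show ((1:Int) == n) = false by simp [Ne.symm h1],
    show ((4:Int) == n) = false by simp [Ne.symm h4],
    show ((7:Int) == n) = false by simp [Ne.symm h7],
    show ((3:Int) == n) = false by simp [Ne.symm h3],
    show ((6:Int) == n) = false by simp [Ne.symm h6],
    show ((9:Int) == n) = false by simp [Ne.symm h9]]

lemma bStep_fold (l : List Int) : ∀ (chunks : List (List Char)) (cur : Char) (run : Int),
    0 ≤ run →
    bFinish (l.foldl bStep (chunks, cur, run))
      = (chunks ++ [List.replicate run.toNat cur]).flatten ++ hseq cur l := by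
  induction l with
  | nil => intro chunks cur run _; simp [bFinish, hseq]
  | cons n l ih =>
    intro chunks cur run hrun
    simp only [List.foldl_cons]
    by_cases h1 : n = 1 ∨ n = 4 ∨ n = 7
    · simp only [bStep, forced_get n, h1, if_true]
      rw [ih _ 'L' 0 le_rfl]
      simp [hseq, h1]
    · by_cases h2 : n = 3 ∨ n = 6 ∨ n = 9
      · simp only [bStep, forced_get n, h1, h2, if_true, if_false]
        rw [ih _ 'R' 0 le_rfl]
        simp [hseq, h1, h2]
      · simp only [bStep, forced_get n, h1, h2, if_false]
        rw [ih chunks cur (run + 1) (by omega)]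
        have ht : (run + 1).toNat = run.toNat + 1 := by omega
        simp [hseq, h1, h2, ht, List.replicate_succ']

lemma aStep_fold (l : List Int) : ∀ (cs : List Char) (c : Char), c = 'L' ∨ c = 'R' →
    l.foldl aStep (some (cs ++ [c])) = some (cs ++ [c] ++ hseq c l) := by
  induction l with
  | nil => intro cs c _; simp [hseq]
  | cons n l ih =>
    intro cs c hc
    simp only [List.foldl_cons, hseq]
    by_cases h1 : n = 1 ∨ n = 4 ∨ n = 7
    · simp only [aStep, h1, if_true, ← List.append_assoc]
      rw [ih (cs ++ [c]) 'L' (Or.inl rfl)]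
      simp
    · by_cases h2 : n = 3 ∨ n = 6 ∨ n = 9
      · simp only [aStep, h1, h2, if_true, if_false, ← List.append_assoc]
        rw [ih (cs ++ [c]) 'R' (Or.inr rfl)]
        simp
      · simp only [aStep, h1, h2, if_false]
        rw [PySem.List.pyGet?_neg_one_append_singleton]
        rcases hc with rfl | rfl
        · simp only [if_true, ← List.append_assoc]
          rw [ih (cs ++ ['L']) 'L' (Or.inl rfl)]
          simp
        · simp only [show ('R' = 'L') = False by simp, if_false, ← List.append_assoc]
          rw [ih (cs ++ ['R']) 'R' (Or.inr rfl)]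
          simp

lemma alt_eq_hseq (numbers : List Int) (hand : String) :
    solution_alt numbers hand
      = String.ofList (hseq (if hand = "left" then 'L' else 'R') numbers) := by
  unfold solution_alt
  rw [bStep_fold numbers [] _ 0 le_rfl]
  simp

-- ===== VERDICT (by name: the statement is the Claim_ definition above) =====
theorem solution_spec : Claim_equal_solution := by
  intro numbers hand _ hpre
  obtain ⟨hne, hd⟩ := hpre
  cases numbers with
  | nil => exact absurd rfl hne
  | cons n0 rest =>
    simp only [List.headD_cons] at hd
    unfold Spec_solution solution
    rw [alt_eq_hseq]
    by_cases hmid : n0 = 2 ∨ n0 = 5 ∨ n0 = 8 ∨ n0 = 0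
    · have h1 : ¬ (n0 = 1 ∨ n0 = 4 ∨ n0 = 7) := by rcases hmid with rfl|rfl|rfl|rfl <;> simp
      have h2 : ¬ (n0 = 3 ∨ n0 = 6 ∨ n0 = 9) := by rcases hmid with rfl|rfl|rfl|rfl <;> simp
      simp only [if_pos hmid]
      by_cases hl : hand = "left"
      · simp only [hl, if_true]
        rw [show (['L'] : List Char) = [] ++ ['L'] by simp,
          aStep_fold rest [] 'L' (Or.inl rfl)]
        simp [hseq, h1, h2]
      · simp only [if_neg hl]
        rw [show (['R'] : List Char) = [] ++ ['R'] by simp,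
          aStep_fold rest [] 'R' (Or.inr rfl)]
        simp [hseq, h1, h2]
    · simp only [if_neg hmid, List.foldl_cons]
      by_cases h1 : n0 = 1 ∨ n0 = 4 ∨ n0 = 7
      · have ha : aStep (some []) n0 = some ([] ++ ['L']) := by simp [aStep, h1]
        rw [ha, aStep_fold rest [] 'L' (Or.inl rfl)]
        simp [hseq, h1]
      · have h2 : n0 = 3 ∨ n0 = 6 ∨ n0 = 9 := by
          simp only [List.mem_cons, List.not_mem_nil, or_false] at hd
          omega
        have ha : aStep (some []) n0 = some ([] ++ ['R']) := by simp [aStep, h1, h2]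
        rw [ha, aStep_fold rest [] 'R' (Or.inr rfl)]
        simp [hseq, h1, h2]
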